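-- pv_equiv track=rewrite | github.com/Algo-Git/Code | 40차시/PRO_주식가격/PRO_주식가격_kdy.py | solution
-- ===== SOURCE A (Python) =====
-- def solution(prices):
--     l = len(prices) #주식가격 수
--     answer = [0 for _ in range(l)] #가격이 떨어지지 않은 기간
--     for i in range(l-1): #마지막을 제외한 주식가격 살펴보기
--         for j in range(i+1, l): #이후 주식가격 살펴보기
--             answer[i]+=1 #가격이 떨어지지 않은 기간 +1
--             if prices[j] < prices[i]: #가격이 떨어진 경우
--                 break #중단
--     return answer #가격이 떨어지지 않은 기간 반환
-- ===== SOURCE B (Python) =====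
-- def solution(prices):
--     n = len(prices)
--     answer = [0] * n
--     stack = []  # indices of a strictly increasing-price suffix, nearest index last
--     for i in range(n - 1, -1, -1):
--         while stack and prices[stack[-1]] >= prices[i]:
--             stack.pop()
--         answer[i] = (stack[-1] - i) if stack else (n - 1 - i)
--         stack.append(i)
--     return answer
-- ===== Notes on version B (the rewrite author's own statement) =====
-- stated objective: faster
-- what changed: A's nested forward scan (for each i, walk right until a smaller price, O(n^2) worst case) is replaced by a single right-to-left pass maintaining a monotonic stack of indices, each pushed and popped at most once (O(n)).
import Mathlib
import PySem

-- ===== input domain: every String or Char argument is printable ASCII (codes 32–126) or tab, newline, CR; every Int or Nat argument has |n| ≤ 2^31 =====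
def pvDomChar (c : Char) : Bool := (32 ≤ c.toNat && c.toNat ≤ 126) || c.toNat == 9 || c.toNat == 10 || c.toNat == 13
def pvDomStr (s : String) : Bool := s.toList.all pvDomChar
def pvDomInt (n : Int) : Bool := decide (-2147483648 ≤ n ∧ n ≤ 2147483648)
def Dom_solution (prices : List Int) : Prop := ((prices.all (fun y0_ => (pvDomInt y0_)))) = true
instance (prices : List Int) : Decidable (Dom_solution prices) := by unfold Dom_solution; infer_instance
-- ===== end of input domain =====

-- B replaces A's quadratic nested scan by a single right-to-left pass with a monotonic
-- stack of indices (objective: faster, O(n) instead of O(n^2)); return values are identical.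

-- ===== PORT A =====
-- inner loop 'for j in range(i+1, l): answer[i]+=1; if prices[j] < prices[i]: break';
-- indices i, j are always in range in A, so getD 0 is exact here.
def solInner (prices : List Int) (i : Nat) : List Nat → List Int → List Int
  | [], answer => answer
  | j :: js, answer =>
    let answer := answer.set i (answer.getD i 0 + 1)
    if prices.getD j 0 < prices.getD i 0 then answer else solInner prices i js answer

def solution (prices : List Int) : List Int :=
  let l := prices.length
  let answer := (List.range l).map (fun _ => (0 : Int))
  (List.range (l - 1)).foldl
    (fun answer i => solInner prices i (List.range' (i + 1) (l - (i + 1))) answer) answer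

-- ===== PORT B =====
-- 'while stack and prices[stack[-1]] >= prices[i]: stack.pop()'; stack head = Python stack top.
def popGE (prices : List Int) (p : Int) : List Nat → List Nat
  | [] => []
  | j :: s => if p ≤ prices.getD j 0 then popGE prices p s else j :: s

-- right-to-left loop 'for i in range(n-1, -1, -1)'; answers are prepended, so acc stays in order.
def altGo (prices : List Int) (n : Nat) : Nat → List Nat → List Int → List Int
  | 0, _, acc => acc
  | i + 1, stack, acc =>
    let s := popGE prices (prices.getD i 0) stack
    let a : Int := match s with
      | [] => (n : Int) - 1 - (i : Int)
      | h :: _ => (h : Int) - (i : Int)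
    altGo prices n i (i :: s) (a :: acc)

def solution_alt (prices : List Int) : List Int :=
  altGo prices prices.length prices.length [] []

-- ===== PRECONDITION & SPEC =====
def Spec_solution (prices : List Int) (out : List Int) : Prop := out = solution_alt prices
instance (prices : List Int) (out : List Int) : Decidable (Spec_solution prices out) := by unfold Spec_solution; infer_instance

-- ===== CLAIM (what is proved, stated in full; the proofs are below) =====
def Claim_equal_solution : Prop := ∀ (prices : List Int), Dom_solution prices → Spec_solution prices (solution prices)

-- ===== LEMMAS AND PROOFS =====

def fdAux (prices : List Int) (pi : Int) : List Nat → Option Nat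
  | [] => none
  | j :: js => if prices.getD j 0 < pi then some j else fdAux prices pi js

def cnt (prices : List Int) (pi : Int) : List Nat → Int
  | [] => 0
  | j :: js => if prices.getD j 0 < pi then 1 else 1 + cnt prices pi js

theorem fdAux_mem (prices : List Int) (pi : Int) :
    ∀ (js : List Nat) (j : Nat), fdAux prices pi js = some j →
      j ∈ js ∧ prices.getD j 0 < pi := by
  intro js
  induction js with
  | nil => intro j h; simp [fdAux] at h
  | cons x xs ih =>
    intro j h
    simp only [fdAux] at h
    split at h
    · obtain rfl : x = j := by simpa using h
      exact ⟨List.mem_cons_self, by assumption⟩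
    · obtain ⟨h1, h2⟩ := ih j h
      exact ⟨List.mem_cons_of_mem _ h1, h2⟩

theorem cnt_range (prices : List Int) (pi : Int) :
    ∀ (m a : Nat),
      cnt prices pi (List.range' a m) =
        match fdAux prices pi (List.range' a m) with
        | some j => (j : Int) - (a : Int) + 1
        | none => (m : Int) := by
  intro m
  induction m with
  | zero => intro a; simp [List.range', cnt, fdAux]
  | succ m ih =>
    intro a
    rw [List.range'_succ]
    simp only [cnt, fdAux]
    by_cases hpa : prices.getD a 0 < pi
    · rw [if_pos hpa, if_pos hpa]; simp
    · rw [if_neg hpa, if_neg hpa, ih (a + 1)]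
      cases hfd : fdAux prices pi (List.range' (a + 1) m) with
      | none => simp only; push_cast; ring
      | some j => simp only; push_cast; ring

def Pg (prices : List Int) (j : Nat) : Int := prices.getD j 0

def specF (prices : List Int) (i : Nat) : Int :=
  match fdAux prices (Pg prices i) (List.range' (i + 1) (prices.length - (i + 1))) with
  | some j => (j : Int) - (i : Int)
  | none => (prices.length : Int) - 1 - (i : Int)

theorem cnt_eq_specF (prices : List Int) (k : Nat) (hk : k < prices.length) :
    cnt prices (prices.getD k 0) (List.range' (k + 1) (prices.length - (k + 1))) =
      specF prices k := by
  rw [cnt_range, specF, Pg]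
  cases hfd : fdAux prices (prices.getD k 0)
      (List.range' (k + 1) (prices.length - (k + 1))) with
  | none =>
    simp only
    rw [Nat.cast_sub (by omega)]
    push_cast; ring
  | some j =>
    have hj := (fdAux_mem _ _ _ _ hfd).1
    have hmem := List.mem_range'_1.mp hj
    simp only
    push_cast
    ring

theorem getD_set_ne (l : List Int) (i k : Nat) (v d : Int) (h : i ≠ k) :
    (l.set i v).getD k d = l.getD k d := by
  simp [List.getD, List.getElem?_set_ne h]

theorem getD_set_self (l : List Int) (i : Nat) (v d : Int) (h : i < l.length) :
    (l.set i v).getD i d = v := by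
  simp [List.getD, h]

theorem solInner_length (prices : List Int) (i : Nat) :
    ∀ (js : List Nat) (answer : List Int),
      (solInner prices i js answer).length = answer.length := by
  intro js
  induction js with
  | nil => intro answer; rfl
  | cons j js ih =>
    intro answer
    simp only [solInner]
    split
    · simp
    · rw [ih]; simp

theorem solInner_getD (prices : List Int) (i : Nat) :
    ∀ (js : List Nat) (answer : List Int), i < answer.length → ∀ k,
      (solInner prices i js answer).getD k 0 =
        if k = i then answer.getD i 0 + cnt prices (prices.getD i 0) js
        else answer.getD k 0 := by
  intro js
  induction js with
  | nil =>
    intro answer _ k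
    by_cases hk : k = i <;> simp [solInner, cnt, hk]
  | cons j js ih =>
    intro answer hi k
    simp only [solInner, cnt]
    by_cases hd : prices.getD j 0 < prices.getD i 0
    · rw [if_pos hd, if_pos hd]
      by_cases hk : k = i
      · subst hk; rw [getD_set_self _ _ _ _ hi]; simp
      · rw [if_neg hk, getD_set_ne _ _ _ _ _ (fun h => hk h.symm)]
    · rw [if_neg hd, if_neg hd, ih _ (by simpa using hi) k]
      by_cases hk : k = i
      · subst hk; rw [if_pos rfl, if_pos rfl, getD_set_self _ _ _ _ hi]; ring
      · rw [if_neg hk, if_neg hk, getD_set_ne _ _ _ _ _ (fun h => hk h.symm)]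

theorem zeros_getD (l k : Nat) : ((List.range l).map (fun _ => (0 : Int))).getD k 0 = 0 := by
  by_cases h : k < l
  · rw [List.getD_eq_getElem _ _ (by simpa using h)]; simp
  · rw [List.getD_eq_default _ _ (by simpa using h)]

theorem foldA_char (prices : List Int) :
    ∀ m, m ≤ prices.length →
      ((List.range m).foldl
        (fun answer i => solInner prices i
          (List.range' (i + 1) (prices.length - (i + 1))) answer)
        ((List.range prices.length).map (fun _ => (0 : Int)))).length = prices.length ∧
      ∀ k, ((List.range m).foldl
        (fun answer i => solInner prices i
          (List.range' (i + 1) (prices.length - (i + 1))) answer)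
        ((List.range prices.length).map (fun _ => (0 : Int)))).getD k 0 =
        if k < m then cnt prices (prices.getD k 0) (List.range' (k + 1) (prices.length - (k + 1)))
        else 0 := by
  intro m
  induction m with
  | zero =>
    intro _
    constructor
    · simp
    · intro k; simpa using zeros_getD prices.length k
  | succ m ih =>
    intro hm
    obtain ⟨ihl, ihd⟩ := ih (by omega)
    rw [List.range_succ, List.foldl_append]
    constructor
    · rw [List.foldl_cons, List.foldl_nil, solInner_length, ihl]
    · intro k
      rw [List.foldl_cons, List.foldl_nil,
        solInner_getD _ _ _ _ (by rw [ihl]; omega) k]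
      by_cases hk : k = m
      · subst hk
        rw [if_pos rfl, ihd k, if_neg (by omega), if_pos (by omega)]
        ring
      · rw [if_neg hk, ihd k]
        by_cases hkm : k < m
        · rw [if_pos hkm, if_pos (by omega)]
        · rw [if_neg hkm, if_neg (by omega)]

theorem solution_eq_map (prices : List Int) :
    solution prices = (List.range prices.length).map (specF prices) := by
  obtain ⟨hl, hd⟩ := foldA_char prices (prices.length - 1) (by omega)
  unfold solution
  apply List.ext_getElem
  · simp only [hl, List.length_map, List.length_range]
  · intro k h1 h2
    rw [← List.getD_eq_getElem _ 0 h1]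
    have hk : k < prices.length := by simpa using h2
    rw [hd k]
    have hmap : ((List.range prices.length).map (specF prices))[k] = specF prices k := by
      simp
    rw [hmap]
    by_cases hkl : k < prices.length - 1
    · rw [if_pos hkl, cnt_eq_specF _ _ hk]
    · have hkeq : k = prices.length - 1 := by omega
      rw [if_neg hkl]
      subst hkeq
      rw [specF]
      have h2 : prices.length - 1 + 1 = prices.length := by omega
      rw [h2, Nat.sub_self]
      simp only [List.range', fdAux]
      rw [Nat.cast_sub (by omega)]
      push_cast; ring

theorem fdAux_none (prices : List Int) (pi : Int) :
    ∀ (js : List Nat), fdAux prices pi js = none →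
      ∀ j ∈ js, ¬ prices.getD j 0 < pi := by
  intro js
  induction js with
  | nil => intro _ j h; simp at h
  | cons x xs ih =>
    intro h j hj
    simp only [fdAux] at h
    split at h
    · simp at h
    · rcases List.mem_cons.mp hj with rfl | hj
      · assumption
      · exact ih h j hj

theorem fdAux_min (prices : List Int) (pi : Int) :
    ∀ (m a j : Nat), fdAux prices pi (List.range' a m) = some j →
      ∀ k, a ≤ k → k < j → ¬ prices.getD k 0 < pi := by
  intro m
  induction m with
  | zero => intro a j h; simp [List.range', fdAux] at h
  | succ m ih =>
    intro a j h k hak hkj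
    rw [List.range'_succ] at h
    simp only [fdAux] at h
    split at h
    · obtain rfl : a = j := by simpa using h
      omega
    · rcases Nat.eq_or_lt_of_le hak with rfl | hlt
      · assumption
      · exact ih (a + 1) j h k hlt hkj

def InvB (prices : List Int) (i : Nat) (s : List Nat) : Prop :=
  s.Pairwise (· < ·) ∧ (∀ j ∈ s, i ≤ j ∧ j < prices.length) ∧
  ∀ j, i ≤ j → j < prices.length →
    ((∀ m, i ≤ m → m < j → Pg prices j < Pg prices m) ↔ j ∈ s)

theorem popGE_split (prices : List Int) (p : Int) :
    ∀ s : List Nat, ∃ t, s = t ++ popGE prices p s ∧ ∀ x ∈ t, p ≤ prices.getD x 0 := by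
  intro s
  induction s with
  | nil => exact ⟨[], rfl, by simp⟩
  | cons j s ih =>
    by_cases h : p ≤ prices.getD j 0
    · obtain ⟨t, ht1, ht2⟩ := ih
      refine ⟨j :: t, ?_, ?_⟩
      · simp only [popGE, if_pos h]; rw [List.cons_append, ← ht1]
      · intro x hx
        rcases List.mem_cons.mp hx with rfl | hx
        · exact h
        · exact ht2 x hx
    · exact ⟨[], by simp only [popGE, if_neg h, List.nil_append], by simp⟩

theorem popGE_head (prices : List Int) (p : Int) :
    ∀ (s : List Nat) (h : Nat) (tl : List Nat),
      popGE prices p s = h :: tl → prices.getD h 0 < p := by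
  intro s
  induction s with
  | nil => intro h tl he; simp [popGE] at he
  | cons j s ih =>
    intro h tl he
    simp only [popGE] at he
    split at he
    · exact ih h tl he
    · obtain rfl : j = h := (List.cons.injEq _ _ _ _ ▸ he).1
      omega

theorem stepB (prices : List Int) (i : Nat) (s : List Nat)
    (hi : i < prices.length) (hInv : InvB prices (i + 1) s) :
    InvB prices i (i :: popGE prices (prices.getD i 0) s) ∧
    (match popGE prices (prices.getD i 0) s with
      | [] => (prices.length : Int) - 1 - (i : Int)
      | h :: _ => (h : Int) - (i : Int)) = specF prices i := by
  obtain ⟨hpw, hbd, hch⟩ := hInv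
  set p := prices.getD i 0 with hp
  obtain ⟨t, hs_eq, ht⟩ := popGE_split prices p s
  set r := popGE prices p s with hr
  -- membership of the popped stack
  have hsub : ∀ j ∈ r, j ∈ s := by
    intro j hj; rw [hs_eq]; exact List.mem_append_right _ hj
  have hrpw : r.Pairwise (· < ·) := (List.pairwise_append.mp (hs_eq ▸ hpw)).2.1
  have hmem2 : ∀ j ∈ r, prices.getD j 0 < p := by
    intro j hj
    cases hr2 : r with
    | nil => rw [hr2] at hj; simp at hj
    | cons h tl =>
      have hh : prices.getD h 0 < p := popGE_head prices p s h tl (hr ▸ hr2)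
      rw [hr2] at hj
      rcases List.mem_cons.mp hj with rfl | hj
      · exact hh
      · -- j is deeper in the stack: h < j, both on s, so prices[j] < prices[h] < p
        have hhj : h < j := by
          rw [hr2] at hrpw
          exact (List.pairwise_cons.mp hrpw).1 j hj
        have hjs : j ∈ s := hsub j (by rw [hr2]; exact List.mem_cons_of_mem _ hj)
        have hhs : h ∈ s := hsub h (by rw [hr2]; exact List.mem_cons_self)
        have hjb := hbd j hjs
        have hhb := hbd h hhs
        have := ((hch j hjb.1 hjb.2).mpr hjs) h hhb.1 hhj
        calc Pg prices j < Pg prices h := this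
          _ < p := hh
  have hmem3 : ∀ j ∈ s, prices.getD j 0 < p → j ∈ r := by
    intro j hj hjp
    rw [hs_eq] at hj
    rcases List.mem_append.mp hj with hj | hj
    · exact absurd (ht j hj) (by omega)
    · exact hj
  -- the new stack satisfies the invariant
  have hInv' : InvB prices i (i :: r) := by
    refine ⟨?_, ?_, ?_⟩
    · rw [List.pairwise_cons]
      exact ⟨fun j hj => by have := (hbd j (hsub j hj)).1; omega, hrpw⟩
    · intro j hj
      rcases List.mem_cons.mp hj with rfl | hj
      · exact ⟨le_refl _, hi⟩
      · have := hbd j (hsub j hj); omega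
    · intro j hij hjn
      rcases Nat.eq_or_lt_of_le hij with rfl | hij
      · exact iff_of_true (fun m h1 h2 => by omega) List.mem_cons_self
      · have hiff1 : (∀ m, i ≤ m → m < j → Pg prices j < Pg prices m) ↔
            (Pg prices j < p ∧ ∀ m, i + 1 ≤ m → m < j → Pg prices j < Pg prices m) := by
          constructor
          · intro h
            exact ⟨h i (le_refl _) hij, fun m h1 h2 => h m (by omega) h2⟩
          · rintro ⟨h1, h2⟩ m hm1 hm2
            rcases Nat.eq_or_lt_of_le hm1 with rfl | hm
            · exact h1
            · exact h2 m hm hm2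
        rw [hiff1, hch j hij hjn]
        constructor
        · rintro ⟨h1, h2⟩
          exact List.mem_cons_of_mem _ (hmem3 j h2 h1)
        · intro h
          rcases List.mem_cons.mp h with rfl | h
          · omega
          · exact ⟨hmem2 j h, hsub j h⟩
  refine ⟨hInv', ?_⟩
  -- the emitted answer equals specF
  rw [specF]
  cases hfd : fdAux prices (Pg prices i) (List.range' (i + 1) (prices.length - (i + 1))) with
  | none =>
    have hno := fdAux_none prices (Pg prices i) _ hfd
    cases hr2 : r with
    | nil => simp only
    | cons h tl =>
      exfalso
      have hhs : h ∈ s := hsub h (by rw [hr2]; exact List.mem_cons_self)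
      have hhb := hbd h hhs
      have hhr : h ∈ List.range' (i + 1) (prices.length - (i + 1)) :=
        List.mem_range'_1.mpr (by omega)
      exact hno h hhr (hmem2 h (by rw [hr2]; exact List.mem_cons_self))
  | some j =>
    obtain ⟨hjr, hjp⟩ := fdAux_mem prices (Pg prices i) _ j hfd
    have hjb := List.mem_range'_1.mp hjr
    have hmin := fdAux_min prices (Pg prices i) _ _ j hfd
    -- j is on the stack
    have hjs : j ∈ s := (hch j (by omega) (by omega)).mp (by
      intro m h1 h2
      have := hmin m h1 h2
      calc Pg prices j < Pg prices i := hjp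
        _ ≤ Pg prices m := by unfold Pg at *; omega)
    have hjr' : j ∈ r := hmem3 j hjs hjp
    cases hr2 : r with
    | nil => rw [hr2] at hjr'; simp at hjr'
    | cons h tl =>
      have hhs : h ∈ s := hsub h (by rw [hr2]; exact List.mem_cons_self)
      have hhb := hbd h hhs
      have hhp : prices.getD h 0 < p := hmem2 h (by rw [hr2]; exact List.mem_cons_self)
      have hhj : h = j := by
        -- h ≥ j by minimality of the first drop, h ≤ j since the stack is ascending
        have h1 : ¬ h < j := fun hlt => (hmin h hhb.1 hlt) hhp
        rw [hr2] at hjr'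
        rcases List.mem_cons.mp hjr' with rfl | hj
        · rfl
        · rw [hr2] at hrpw
          have := (List.pairwise_cons.mp hrpw).1 j hj
          omega
      simp only [hhj]

theorem altGo_eq (prices : List Int) :
    ∀ (i : Nat) (s : List Nat) (acc : List Int), i ≤ prices.length →
      InvB prices i s →
      altGo prices prices.length i s acc =
        (List.range i).map (specF prices) ++ acc := by
  intro i
  induction i with
  | zero => intro s acc _ _; simp [altGo]
  | succ i ih =>
    intro s acc hi hInv
    obtain ⟨hInv', ha⟩ := stepB prices i s (by omega) hInv
    simp only [altGo]
    rw [ih _ _ (by omega) hInv', ha, List.range_succ, List.map_append]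
    simp

theorem solution_alt_eq_map (prices : List Int) :
    solution_alt prices = (List.range prices.length).map (specF prices) := by
  rw [solution_alt, altGo_eq prices prices.length [] [] (le_refl _)]
  · simp
  · exact ⟨List.Pairwise.nil, by simp, fun j h1 h2 => by omega⟩

-- ===== VERDICT (by name: the statement is the Claim_ definition above) =====
theorem solution_spec : Claim_equal_solution := by
  intro prices _
  unfold Spec_solution
  rw [solution_eq_map, solution_alt_eq_map]
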